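-- pv_equiv track=rewrite | github.com/mihaelahrihor/grundlagen-der-programmierung | L2/ex 4.py | cripteaza_lista
-- ===== SOURCE A (Python) =====
-- def cripteaza_lista(lista, metoda):
--     if not lista:
--         return []
--
--     cheie = lista[0]
--     criptata = [cheie]
--
--     for numar in lista[1:]:
--         if metoda == '+':
--             cheie += numar
--         elif metoda == '*':
--             cheie *= numar
--         elif metoda == 'XOR':
--             cheie = cheie ^ numar
--         criptata.append(cheie)
--
--     return criptata
-- ===== SOURCE B (Python) =====
-- def cripteaza_lista(lista, metoda):
--     # Divide-and-conquer prefix scan: scan each half recursively, then fold the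
--     # last value of the left half into every value of the right half.
--     # Correct because every combiner used here is associative.
--     func = {
--         '+': lambda a, b: a + b,
--         '*': lambda a, b: a * b,
--         'XOR': lambda a, b: a ^ b,
--     }.get(metoda, lambda a, b: a)
--
--     def scan(xs):
--         if len(xs) <= 1:
--             return list(xs)
--         mid = len(xs) // 2
--         left = scan(xs[:mid])
--         t = left[-1]
--         return left + [func(t, y) for y in scan(xs[mid:])]
--
--     return scan(lista)
-- ===== Notes on version B (the rewrite author's own statement) =====
-- stated objective: alternative
-- what changed: Replaces the linear stateful loop with a divide-and-conquer prefix scan: recursively scan each half and fold the left half's last value into every value of the scanned right half, correct because each combiner (add, mul, xor, identity-default) is associative.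
import Mathlib
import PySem

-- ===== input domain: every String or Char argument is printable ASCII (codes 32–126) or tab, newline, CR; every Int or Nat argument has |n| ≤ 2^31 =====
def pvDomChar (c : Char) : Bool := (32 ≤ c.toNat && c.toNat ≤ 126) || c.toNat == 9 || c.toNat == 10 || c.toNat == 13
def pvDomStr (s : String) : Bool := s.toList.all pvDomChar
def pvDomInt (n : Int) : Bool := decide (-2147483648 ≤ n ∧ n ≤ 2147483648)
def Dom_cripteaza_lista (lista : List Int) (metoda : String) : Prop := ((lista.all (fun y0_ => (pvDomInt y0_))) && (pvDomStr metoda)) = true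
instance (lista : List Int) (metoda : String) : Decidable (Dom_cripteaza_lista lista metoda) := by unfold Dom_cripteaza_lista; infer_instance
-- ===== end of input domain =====

-- B computes the same cumulative-encryption list by a divide-and-conquer prefix scan (all the combiners are associative); return value only, no speed claim.

-- ===== PORT A =====
-- the for-loop over lista[1:], carrying (cheie, criptata) and re-testing metoda at each step
def cripteaza_lista (lista : List Int) (metoda : String) : List Int :=
  match lista with
  | [] => []
  | cheie0 :: rest =>
    (rest.foldl
      (fun (st : Int × List Int) numar =>
        let cheie :=
          if metoda = "+" then st.1 + numar
          else if metoda = "*" then st.1 * numar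
          else if metoda = "XOR" then PySem.Int.bxor st.1 numar
          else st.1
        (cheie, st.2 ++ [cheie]))
      (cheie0, [cheie0])).2

-- ===== PORT B =====
-- the combiner chosen once from metoda (identity in the first argument by default)
def cripteaza_lista_combiner (metoda : String) : Int → Int → Int :=
  if metoda = "+" then (· + ·)
  else if metoda = "*" then (· * ·)
  else if metoda = "XOR" then PySem.Int.bxor
  else fun a _ => a

-- scan(xs): scan each half recursively, then fold the left half's last value t into the right half.
-- left is provably nonempty there (mid ≥ 1), so Python's 'left[-1]' is exactly left.getLastD 0.
def cripteaza_lista_scan (f : Int → Int → Int) (xs : List Int) : List Int :=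
  if xs.length ≤ 1 then xs
  else
    (cripteaza_lista_scan f (xs.take (xs.length / 2))) ++
      (cripteaza_lista_scan f (xs.drop (xs.length / 2))).map
        (fun y => f ((cripteaza_lista_scan f (xs.take (xs.length / 2))).getLastD 0) y)
termination_by xs.length
decreasing_by
  · simp; omega
  · simp; omega

def cripteaza_lista_alt (lista : List Int) (metoda : String) : List Int :=
  cripteaza_lista_scan (cripteaza_lista_combiner metoda) lista

-- ===== PRECONDITION & SPEC =====
def Spec_cripteaza_lista (lista : List Int) (metoda : String) (out : List Int) : Prop := out = cripteaza_lista_alt lista metoda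
instance (lista : List Int) (metoda : String) (out : List Int) : Decidable (Spec_cripteaza_lista lista metoda out) := by unfold Spec_cripteaza_lista; infer_instance

-- ===== CLAIM (what is proved, stated in full; the proofs are below) =====
def Claim_equal_cripteaza_lista : Prop := ∀ (lista : List Int) (metoda : String), Dom_cripteaza_lista lista metoda → Spec_cripteaza_lista lista metoda (cripteaza_lista lista metoda)

-- ===== LEMMAS AND PROOFS =====
-- associativity of PySem.Int.bxor, via the sign/magnitude encoding of Int
def pvEnc (s : Bool) (n : Nat) : Int := if s then -(n:Int) - 1 else n

theorem pvBxor_enc (s1 s2 : Bool) (m n : Nat) :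
    PySem.Int.bxor (pvEnc s1 m) (pvEnc s2 n) = pvEnc (s1 ^^ s2) (m ^^^ n) := by
  cases s1 <;> cases s2 <;> simp [pvEnc, PySem.Int.bxor] <;> omega

theorem pvEnc_repr (a : Int) : ∃ s n, a = pvEnc s n := by
  by_cases h : 0 ≤ a
  · exact ⟨false, a.toNat, by simp [pvEnc]; omega⟩
  · exact ⟨true, (-a - 1).toNat, by simp [pvEnc]; omega⟩

theorem pvBxor_assoc (a b c : Int) :
    PySem.Int.bxor (PySem.Int.bxor a b) c = PySem.Int.bxor a (PySem.Int.bxor b c) := by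
  obtain ⟨s1, m, rfl⟩ := pvEnc_repr a
  obtain ⟨s2, n, rfl⟩ := pvEnc_repr b
  obtain ⟨s3, k, rfl⟩ := pvEnc_repr c
  rw [pvBxor_enc, pvBxor_enc, pvBxor_enc, pvBxor_enc, Bool.xor_assoc, Nat.xor_assoc]

-- linear reference scan: pvRun f c l = the running values f c l0, f (f c l0) l1, …
def pvRun (f : Int → Int → Int) (c : Int) : List Int → List Int
  | [] => []
  | x :: xs => f c x :: pvRun f (f c x) xs

def pvPscan (f : Int → Int → Int) : List Int → List Int
  | [] => []
  | a :: xs => a :: pvRun f a xs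

theorem pvRun_append (f : Int → Int → Int) (u v : List Int) (c : Int) :
    pvRun f c (u ++ v) = pvRun f c u ++ pvRun f ((pvRun f c u).getLastD c) v := by
  induction u generalizing c with
  | nil => simp [pvRun]
  | cons x u ih =>
    simp only [List.cons_append, pvRun, List.getLastD_cons]
    rw [ih (f c x)]

theorem pvRun_assoc_map (f : Int → Int → Int)
    (hf : ∀ a b c, f (f a b) c = f a (f b c)) (t c : Int) (zs : List Int) :
    pvRun f (f t c) zs = (pvRun f c zs).map (fun y => f t y) := by
  induction zs generalizing c with
  | nil => simp [pvRun]
  | cons z zs ih => simp [pvRun, hf, ih (f c z)]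

theorem pvPscan_map (f : Int → Int → Int)
    (hf : ∀ a b c, f (f a b) c = f a (f b c)) (t : Int) (zs : List Int) :
    (pvPscan f zs).map (fun y => f t y) = pvRun f t zs := by
  cases zs with
  | nil => simp [pvPscan, pvRun]
  | cons z zs => simp [pvPscan, pvRun, pvRun_assoc_map f hf t z zs]

theorem pvPscan_append (f : Int → Int → Int) (ys zs : List Int) (hys : ys ≠ []) :
    pvPscan f (ys ++ zs)
      = pvPscan f ys ++ pvRun f ((pvPscan f ys).getLastD 0) zs := by
  cases ys with
  | nil => exact absurd rfl hys
  | cons a ys =>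
    simp only [pvPscan, List.cons_append, List.getLastD_cons]
    rw [pvRun_append f ys zs a]

theorem pvScan_eq_pscan (f : Int → Int → Int)
    (hf : ∀ a b c, f (f a b) c = f a (f b c)) (xs : List Int) :
    cripteaza_lista_scan f xs = pvPscan f xs := by
  induction hn : xs.length using Nat.strong_induction_on generalizing xs with
  | _ n ih =>
    subst hn
    rw [cripteaza_lista_scan.eq_def]
    by_cases h : xs.length ≤ 1
    · rw [if_pos h]
      match xs, h with
      | [], _ => rfl
      | [a], _ => rfl
    · rw [if_neg h]
      have hL : (xs.take (xs.length / 2)).length < xs.length := by simp; omega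
      have hR : (xs.drop (xs.length / 2)).length < xs.length := by simp; omega
      rw [ih _ hL _ rfl, ih _ hR _ rfl]
      have htk : xs.take (xs.length / 2) ≠ [] := by
        intro hc
        rw [List.take_eq_nil_iff] at hc
        rcases hc with hc | hc <;>
          first
          | omega
          | (subst hc; simp at h)
      rw [pvPscan_map f hf, ← pvPscan_append f _ _ htk, List.take_append_drop]

-- A's fold equals the linear scan with the combiner selected once
theorem cripteaza_lista_fold_eq (metoda : String) (rest : List Int) (cheie : Int) (acc : List Int) :
    (rest.foldl
      (fun (st : Int × List Int) numar =>
        let c :=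
          if metoda = "+" then st.1 + numar
          else if metoda = "*" then st.1 * numar
          else if metoda = "XOR" then PySem.Int.bxor st.1 numar
          else st.1
        (c, st.2 ++ [c]))
      (cheie, acc)).2
      = acc ++ pvRun (cripteaza_lista_combiner metoda) cheie rest := by
  induction rest generalizing cheie acc with
  | nil => simp [pvRun]
  | cons numar rest ih =>
    simp only [List.foldl_cons, pvRun]
    rw [ih]
    simp [cripteaza_lista_combiner]
    split_ifs <;> simp

theorem cripteaza_lista_combiner_assoc (metoda : String) :
    ∀ a b c, cripteaza_lista_combiner metoda (cripteaza_lista_combiner metoda a b) c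
      = cripteaza_lista_combiner metoda a (cripteaza_lista_combiner metoda b c) := by
  intro a b c
  unfold cripteaza_lista_combiner
  split_ifs
  · exact add_assoc a b c
  · exact mul_assoc a b c
  · exact pvBxor_assoc a b c
  · rfl

-- ===== VERDICT (by name: the statement is the Claim_ definition above) =====
theorem cripteaza_lista_spec : Claim_equal_cripteaza_lista := by
  intro lista metoda _
  unfold Spec_cripteaza_lista cripteaza_lista_alt
  rw [pvScan_eq_pscan _ (cripteaza_lista_combiner_assoc metoda)]
  cases lista with
  | nil => rfl
  | cons cheie rest =>
    simp only [cripteaza_lista, pvPscan]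
    rw [cripteaza_lista_fold_eq]
    simp
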